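-- pv_equiv track=rewrite | github.com/ujwal-jibhkate/hiv_drm_enricher | scripts/run_analysis_pipeline.py | get_mutation_subsets
-- ===== SOURCE A (Python) =====
-- import itertools
--
-- def get_mutation_subsets(mutation_set: set) -> set:
--     """
--     Generates all non-empty, canonical-keyed subsets of mutations
--     UP TO A CLINICALLY-RELEVANT LIMIT.
--     """
--     subsets_as_keys = set()
--     mut_list = sorted(list(mutation_set))
--
--     # --- THIS IS THE FIX ---
--     # We will only check for combinations of size 1, 2, 3, and 4.
--     # This prevents combinatorial explosion from noisy reads.
--     MAX_COMBO_SIZE = 4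
--
--     # We take the smaller of the list size or our cap
--     max_k_to_check = min(len(mut_list), MAX_COMBO_SIZE)
--
--     for k in range(1, max_k_to_check + 1):
--     # --- END OF FIX ---
--         for subset_tuple in itertools.combinations(mut_list, k):
--             canonical_key = ",".join(subset_tuple)
--             subsets_as_keys.add(canonical_key)
--
--     return subsets_as_keys
-- ===== SOURCE B (Python) =====
-- def get_mutation_subsets(mutation_set: set) -> set:
--     """
--     Single reverse pass with size-bucketed accumulators (subset DP):
--     processing the sorted mutations back to front, sk holds all size-k
--     comma-keys over the suffix seen so far, in lexicographic order.
--     """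
--     s1, s2, s3, s4 = [], [], [], []
--     for x in reversed(sorted(mutation_set)):
--         s4 = [x + "," + k for k in s3] + s4
--         s3 = [x + "," + k for k in s2] + s3
--         s2 = [x + "," + k for k in s1] + s2
--         s1 = [x] + s1
--     return set(s1 + s2 + s3 + s4)
-- ===== Notes on version B (the rewrite author's own statement) =====
-- stated objective: alternative
-- what changed: Replaces the per-size nested loops over itertools.combinations with a single reverse pass over the sorted list maintaining four size-bucketed key accumulators (subset DP): each element extends the smaller buckets once, so no combination generator or per-k loop remains.
import Mathlib
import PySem

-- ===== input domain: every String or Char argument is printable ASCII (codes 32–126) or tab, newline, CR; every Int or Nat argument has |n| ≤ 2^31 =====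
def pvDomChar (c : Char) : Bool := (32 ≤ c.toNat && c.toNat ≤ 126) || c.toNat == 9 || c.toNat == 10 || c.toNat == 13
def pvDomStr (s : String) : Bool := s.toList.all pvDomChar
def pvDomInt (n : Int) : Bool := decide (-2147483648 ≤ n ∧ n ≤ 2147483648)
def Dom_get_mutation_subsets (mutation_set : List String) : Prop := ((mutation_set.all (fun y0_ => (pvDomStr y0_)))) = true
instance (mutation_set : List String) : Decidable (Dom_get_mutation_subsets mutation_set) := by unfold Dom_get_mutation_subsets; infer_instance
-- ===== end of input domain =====

-- B replaces the per-size itertools.combinations loops by one reverse pass over the sorted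
-- mutations with four size-bucketed accumulators (subset DP); objective: alternative, same cost.

-- ===== PORT A =====
-- port of itertools.combinations(xs, k) on a list, in the library's lexicographic order
def pvCombos : List String → Nat → List (List String)
  | _, 0 => [[]]
  | [], _ + 1 => []
  | x :: xs, k + 1 => ((pvCombos xs k).map (fun t => x :: t)) ++ pvCombos xs (k + 1)

-- body of A over the sorted list mut_list, with max_k_to_check = min(len(mut_list), MAX_COMBO_SIZE)
def pvA_body (mut_list : List String) (max_k_to_check : Int) : List String :=
  (PySem.List.pyRange 1 (max_k_to_check + 1) 1).foldl
    (fun subsets_as_keys k =>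
      (pvCombos mut_list k.toNat).foldl
        (fun s subset_tuple => PySem.Set.add s (PySem.Str.join "," subset_tuple)) subsets_as_keys)
    PySem.Set.empty

def pvA_outer (mut_list : List String) : List String :=
  pvA_body mut_list (min (mut_list.length : Int) 4)

def get_mutation_subsets (mutation_set : List String) : List String :=
  pvA_outer (PySem.List.sorted mutation_set (fun x => x) false)

-- ===== PORT B =====
-- the 'for x in reversed(sorted(...))' loop of Source B: each recursive call is one earlier
-- iteration's state (s1, s2, s3, s4); the step prepends the new element's extensions.
def pvPass : List String → List String × List String × List String × List String
  | [] => ([], [], [], [])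
  | x :: xs =>
    let p := pvPass xs
    (x :: p.1,
     (p.1.map (fun k => x ++ "," ++ k)) ++ p.2.1,
     (p.2.1.map (fun k => x ++ "," ++ k)) ++ p.2.2.1,
     (p.2.2.1.map (fun k => x ++ "," ++ k)) ++ p.2.2.2)

def get_mutation_subsets_alt (mutation_set : List String) : List String :=
  let p := pvPass (PySem.List.sorted mutation_set (fun x => x) false)
  PySem.Set.ofList (p.1 ++ p.2.1 ++ p.2.2.1 ++ p.2.2.2)

-- ===== PRECONDITION & SPEC =====
def Spec_get_mutation_subsets (mutation_set : List String) (out : List String) : Prop := out = get_mutation_subsets_alt mutation_set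
instance (mutation_set : List String) (out : List String) : Decidable (Spec_get_mutation_subsets mutation_set out) := by unfold Spec_get_mutation_subsets; infer_instance

-- ===== CLAIM (what is proved, stated in full; the proofs are below) =====
def Claim_equal_get_mutation_subsets : Prop := ∀ (mutation_set : List String), Dom_get_mutation_subsets mutation_set → Spec_get_mutation_subsets mutation_set (get_mutation_subsets mutation_set)

-- ===== LEMMAS AND PROOFS =====

-- the comma-keys of all size-k combinations, in A's (lexicographic) order
def pvJ (ys : List String) (k : Nat) : List String :=
  (pvCombos ys k).map (PySem.Str.join ",")

theorem pvCombos_ne_nil (xs : List String) (k : Nat) (t : List String)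
    (ht : t ∈ pvCombos xs (k + 1)) : t ≠ [] := by
  induction xs generalizing k t with
  | nil => simp [pvCombos] at ht
  | cons x xs ih =>
    simp only [pvCombos, List.mem_append, List.mem_map] at ht
    rcases ht with ⟨u, _, rfl⟩ | h
    · simp
    · exact ih k t h

theorem pvJoin_cons (x : String) (t : List String) (ht : t ≠ []) :
    PySem.Str.join "," (x :: t) = x ++ "," ++ PySem.Str.join "," t := by
  cases t with
  | nil => exact absurd rfl ht
  | cons y t =>
    simp [PySem.Str.join, PySem.Chars.join_cons_cons]
    apply String.ext
    simp

theorem pvJ_cons (x : String) (xs : List String) (k : Nat) :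
    pvJ (x :: xs) (k + 2) = (pvJ xs (k + 1)).map (fun s => x ++ "," ++ s) ++ pvJ xs (k + 2) := by
  simp only [pvJ, pvCombos, List.map_append, List.map_map]
  congr 1
  apply List.map_congr_left
  intro t ht
  exact pvJoin_cons x t (pvCombos_ne_nil xs k t ht)

theorem pvJ_one (x : String) (xs : List String) :
    pvJ (x :: xs) 1 = x :: pvJ xs 1 := by
  simp only [pvJ, pvCombos, List.map_append, List.map_map, List.map_cons, List.map_nil]
  have : PySem.Str.join "," [x] = x := by
    simp [PySem.Str.join, PySem.Chars.join_singleton]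
  simp [this]

theorem pvPass_eq (ys : List String) :
    pvPass ys = (pvJ ys 1, pvJ ys 2, pvJ ys 3, pvJ ys 4) := by
  induction ys with
  | nil => rfl
  | cons x xs ih =>
    simp only [pvPass, ih]
    refine Prod.ext ?_ (Prod.ext ?_ (Prod.ext ?_ ?_)) <;> simp only
    · exact (pvJ_one x xs).symm
    · exact (pvJ_cons x xs 0).symm
    · exact (pvJ_cons x xs 1).symm
    · exact (pvJ_cons x xs 2).symm

-- one round of A's inner loop: add the keys of all size-k combinations
def pvAddK (ys : List String) (res : PySem.Set String) (k : Nat) : PySem.Set String :=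
  (pvCombos ys k).foldl (fun r t => PySem.Set.add r (PySem.Str.join "," t)) res

theorem pvAddK_eq_foldl (ys : List String) (res : PySem.Set String) (k : Nat) :
    pvAddK ys res k = (pvJ ys k).foldl PySem.Set.add res := by
  simp [pvAddK, pvJ, List.foldl_map]

theorem pvCombos_nil_of_lt (xs : List String) (k : Nat) (h : xs.length < k) :
    pvCombos xs k = [] := by
  induction xs generalizing k with
  | nil =>
    cases k with
    | zero => omega
    | succ k => rfl
  | cons x xs ih =>
    cases k with
    | zero => omega
    | succ k =>
      simp at h
      simp [pvCombos, ih k (by omega), ih (k + 1) (by omega)]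

theorem pvOfList_eq (ys : List String) :
    PySem.Set.ofList (pvJ ys 1 ++ pvJ ys 2 ++ pvJ ys 3 ++ pvJ ys 4)
      = pvAddK ys (pvAddK ys (pvAddK ys (pvAddK ys PySem.Set.empty 1) 2) 3) 4 := by
  rw [PySem.Set.ofList_eq_foldl]
  simp only [List.foldl_append, pvAddK_eq_foldl]
  rfl

-- ===== VERDICT (by name: the statement is the Claim_ definition above) =====
theorem get_mutation_subsets_spec : Claim_equal_get_mutation_subsets := by
  intro mutation_set _
  unfold Spec_get_mutation_subsets get_mutation_subsets get_mutation_subsets_alt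
  simp only [pvPass_eq]
  generalize PySem.List.sorted mutation_set (fun x => x) false = ys
  rw [pvOfList_eq]
  unfold pvA_outer pvA_body
  rcases ys with _ | ⟨a, _ | ⟨b, _ | ⟨c, _ | ⟨d, tl⟩⟩⟩⟩
  · have hmin : min ((([] : List String).length : Int)) 4 = 0 := by simp
    rw [hmin]
    have hr : PySem.List.pyRange 1 (0 + 1) 1 = [] := by decide
    rw [hr]
    have e1 : ∀ r, pvAddK [] r 1 = r := fun r => by
      simp [pvAddK, pvCombos_nil_of_lt ([] : List String) 1 (by simp)]
    have e2 : ∀ r, pvAddK [] r 2 = r := fun r => by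
      simp [pvAddK, pvCombos_nil_of_lt ([] : List String) 2 (by simp)]
    have e3 : ∀ r, pvAddK [] r 3 = r := fun r => by
      simp [pvAddK, pvCombos_nil_of_lt ([] : List String) 3 (by simp)]
    have e4 : ∀ r, pvAddK [] r 4 = r := fun r => by
      simp [pvAddK, pvCombos_nil_of_lt ([] : List String) 4 (by simp)]
    rw [e4, e3, e2, e1]
    simp only [List.foldl_nil]
  · have hmin : min ((([a] : List String).length : Int)) 4 = 1 := by simp
    rw [hmin]
    have hr : PySem.List.pyRange 1 (1 + 1) 1 = [1] := by decide
    rw [hr]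
    have e2 : ∀ r, pvAddK [a] r 2 = r := fun r => by
      simp [pvAddK, pvCombos_nil_of_lt [a] 2 (by simp)]
    have e3 : ∀ r, pvAddK [a] r 3 = r := fun r => by
      simp [pvAddK, pvCombos_nil_of_lt [a] 3 (by simp)]
    have e4 : ∀ r, pvAddK [a] r 4 = r := fun r => by
      simp [pvAddK, pvCombos_nil_of_lt [a] 4 (by simp)]
    rw [e4, e3, e2]
    simp only [List.foldl_cons, List.foldl_nil, pvAddK, Int.toNat_one]
    try rfl
  · have hmin : min ((([a, b] : List String).length : Int)) 4 = 2 := by simp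
    rw [hmin]
    have hr : PySem.List.pyRange 1 (2 + 1) 1 = [1, 2] := by decide
    rw [hr]
    have e3 : ∀ r, pvAddK [a, b] r 3 = r := fun r => by
      simp [pvAddK, pvCombos_nil_of_lt [a, b] 3 (by simp)]
    have e4 : ∀ r, pvAddK [a, b] r 4 = r := fun r => by
      simp [pvAddK, pvCombos_nil_of_lt [a, b] 4 (by simp)]
    rw [e4, e3]
    simp only [List.foldl_cons, List.foldl_nil, pvAddK, Int.toNat_one]
    try rfl
  · have hmin : min ((([a, b, c] : List String).length : Int)) 4 = 3 := by simp
    rw [hmin]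
    have hr : PySem.List.pyRange 1 (3 + 1) 1 = [1, 2, 3] := by decide
    rw [hr]
    have e4 : ∀ r, pvAddK [a, b, c] r 4 = r := fun r => by
      simp [pvAddK, pvCombos_nil_of_lt [a, b, c] 4 (by simp)]
    rw [e4]
    simp only [List.foldl_cons, List.foldl_nil, pvAddK, Int.toNat_one]
    try rfl
  · have hmin : min (((a :: b :: c :: d :: tl : List String).length : Int)) 4 = 4 := by
      simp only [List.length_cons]
      omega
    rw [hmin]
    have hr : PySem.List.pyRange 1 (4 + 1) 1 = [1, 2, 3, 4] := by decide
    rw [hr]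
    simp only [List.foldl_cons, List.foldl_nil, pvAddK, Int.toNat_one]
    try rfl
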